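-- pv_equiv track=rewrite | github.com/qalle2/qromp | qromp_enc.py | ips_get_blocks
-- ===== SOURCE A (Python) =====
-- IPS_MAX_BLK_LEN = 0xffff
--
-- def ips_get_blocks(data1, data2):
--     # generate (start, length) of blocks that differ
--
--     start = -1  # start position of current block (-1 = none)
--
--     for (pos, (byte1, byte2)) in enumerate(zip(data1, data2)):
--         if start == -1 and byte1 != byte2:
--             # start a block
--             start = pos
--         elif start != -1 and byte1 == byte2:
--             # end a block
--             yield (start, pos - start)
--             start = -1
--         elif start != -1 and pos - start == IPS_MAX_BLK_LEN:
--             # end a block and start a new one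
--             yield (start, pos - start)
--             start = pos
--
--     if start != -1:
--         # end the last block shared by both files
--         yield (start, len(data1) - start)
--
--     # data after end of first file, if any
--     for start in range(len(data1), len(data2), IPS_MAX_BLK_LEN):
--         yield (start, min(len(data2) - start, IPS_MAX_BLK_LEN))
-- ===== SOURCE B (Python) =====
-- IPS_MAX_BLK_LEN = 0xffff
--
-- def ips_get_blocks(data1, data2):
--     # Two-phase: find the maximal runs of differing positions in the compared
--     # region, then cut each run into <=MAX-sized chunks arithmetically.
--     MAX = IPS_MAX_BLK_LEN
--     runs = []  # maximal runs of differing positions, as (start, end) pairs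
--     cur = None
--     for i, (a, b) in enumerate(zip(data1, data2)):
--         if a != b:
--             if cur is None:
--                 cur = i
--         elif cur is not None:
--             runs.append((cur, i))
--             cur = None
--     if cur is not None:
--         runs.append((cur, min(len(data1), len(data2))))
--     out = []
--     for s, e in runs:
--         for t in range(s, e, MAX):
--             out.append((t, min(MAX, e - t)))
--     # data after end of first file, if any
--     for start in range(len(data1), len(data2), MAX):
--         out.append((start, min(len(data2) - start, MAX)))
--     return out
-- ===== Notes on version B (the rewrite author's own statement) =====
-- stated objective: alternative
-- what changed: A interleaves run detection and MAX-length chunking in one stateful generator loop; B separates the phases: it first collects the maximal runs of differing positions over zip(data1,data2), then cuts each run into chunks arithmetically with range(s,e,MAX), plus the unchanged tail loop. Pre_ restricts to len(data1) <= len(data2), the natural domain for IPS encoding (IPS cannot shrink a file): when data1 is longer, a run still open at the end of the compared region makes A emit a final block spanning to len(data1), past the compared region and possibly longer than IPS_MAX_BLK_LEN.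
-- outside the precondition, e.g. on ips_get_blocks([1, 2], [3]): A returns [(0, 2)], B returns [(0, 1)]
import Mathlib
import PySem

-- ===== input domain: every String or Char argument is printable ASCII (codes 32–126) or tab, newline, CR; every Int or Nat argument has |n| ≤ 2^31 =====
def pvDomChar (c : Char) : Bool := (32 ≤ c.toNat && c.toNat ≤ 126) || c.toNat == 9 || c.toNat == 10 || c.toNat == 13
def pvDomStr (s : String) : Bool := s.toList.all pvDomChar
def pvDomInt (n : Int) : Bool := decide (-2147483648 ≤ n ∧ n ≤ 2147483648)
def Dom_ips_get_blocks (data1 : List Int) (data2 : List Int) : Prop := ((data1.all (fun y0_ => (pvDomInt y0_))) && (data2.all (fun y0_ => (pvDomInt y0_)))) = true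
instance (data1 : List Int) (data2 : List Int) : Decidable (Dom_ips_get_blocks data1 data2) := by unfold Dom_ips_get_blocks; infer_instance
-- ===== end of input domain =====

-- B replaces A's single stateful generator loop (run detection and MAX-chunking
-- interleaved) by two phases: collect the maximal runs of differing positions,
-- then cut each run into chunks arithmetically; same return value on Pre_
-- (A is a generator, materialised as a list).

-- ===== PORT A =====
-- the 'for (pos, (byte1, byte2)) in enumerate(zip(...))' loop, as structural
-- recursion over the zipped pairs with the enumerate counter 'pos' and 'start'
def ipsLoopA : List (Int × Int) → Int → Int → Int → List (Int × Int)
  | [], _, start, l1 =>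
      -- 'if start != -1: yield (start, len(data1) - start)'
      if start ≠ -1 then [(start, l1 - start)] else []
  | (b1, b2) :: rest, pos, start, l1 =>
      if start = -1 ∧ b1 ≠ b2 then
        ipsLoopA rest (pos + 1) pos l1
      else if start ≠ -1 ∧ b1 = b2 then
        (start, pos - start) :: ipsLoopA rest (pos + 1) (-1) l1
      else if start ≠ -1 ∧ pos - start = 65535 then
        (start, pos - start) :: ipsLoopA rest (pos + 1) pos l1
      else
        ipsLoopA rest (pos + 1) start l1

def ips_get_blocks (data1 : List Int) (data2 : List Int) : List (Int × Int) :=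
  ipsLoopA (data1.zip data2) 0 (-1) (data1.length : Int) ++
    (PySem.List.pyRange (data1.length : Int) (data2.length : Int) 65535).map
      (fun start => (start, min ((data2.length : Int) - start) 65535))

-- ===== PORT B =====
-- phase 1: maximal runs of differing positions as (start, end) pairs;
-- 'cur' is the current run start, 'endv' the value appended when the run is
-- still open at the end ('min(len(data1), len(data2))' in Source B)
def pvRuns : List Bool → Int → Option Int → Int → List (Int × Int)
  | [], _, none, _ => []
  | [], _, some s, endv => [(s, endv)]
  | d :: rest, i, none, endv =>
      if d then pvRuns rest (i + 1) (some i) endv else pvRuns rest (i + 1) none endv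
  | d :: rest, i, some s, endv =>
      if d then pvRuns rest (i + 1) (some s) endv else (s, i) :: pvRuns rest (i + 1) none endv

-- phase 2: 'for t in range(s, e, MAX): out.append((t, min(MAX, e - t)))'
def pvChunks (r : Int × Int) : List (Int × Int) :=
  (PySem.List.pyRange r.1 r.2 65535).map (fun t => (t, min 65535 (r.2 - t)))

def ips_get_blocks_alt (data1 : List Int) (data2 : List Int) : List (Int × Int) :=
  (pvRuns ((data1.zip data2).map (fun p => decide (p.1 ≠ p.2))) 0 none
      (min (data1.length : Int) (data2.length : Int))).flatMap pvChunks ++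
    (PySem.List.pyRange (data1.length : Int) (data2.length : Int) 65535).map
      (fun start => (start, min ((data2.length : Int) - start) 65535))

-- ===== PRECONDITION & SPEC =====
-- Pre_ restricts to len(data1) ≤ len(data2), the natural domain for IPS
-- encoding (an IPS patch cannot shrink a file): when data1 is longer, a run
-- still open at the end of the compared region makes A emit a final block
-- spanning to len(data1), past the compared region and possibly longer than
-- IPS_MAX_BLK_LEN, which B's uniform chunking does not reproduce.
def Pre_ips_get_blocks (data1 : List Int) (data2 : List Int) : Prop :=
  data1.length ≤ data2.length
instance (data1 : List Int) (data2 : List Int) : Decidable (Pre_ips_get_blocks data1 data2) := by unfold Pre_ips_get_blocks; infer_instance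
def pvWitness_ips_get_blocks : List Int × List Int := ([1, 2], [3, 4, 5])
def Spec_ips_get_blocks (data1 : List Int) (data2 : List Int) (out : List (Int × Int)) : Prop := out = ips_get_blocks_alt data1 data2
instance (data1 : List Int) (data2 : List Int) (out : List (Int × Int)) : Decidable (Spec_ips_get_blocks data1 data2 out) := by unfold Spec_ips_get_blocks; infer_instance

-- ===== CLAIM (what is proved, stated in full; the proofs are below) =====
def Claim_equal_ips_get_blocks : Prop := ∀ (data1 : List Int) (data2 : List Int), Dom_ips_get_blocks data1 data2 → Pre_ips_get_blocks data1 data2 → Spec_ips_get_blocks data1 data2 (ips_get_blocks data1 data2)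

-- ===== LEMMAS AND PROOFS =====

-- pyRange with the literal step 65535: induction forms
lemma pyRangeM_nil (a b : Int) (h : b ≤ a) : PySem.List.pyRange a b 65535 = [] := by
  rw [PySem.List.pyRange_of_pos a b (by norm_num)]
  rw [if_neg (by omega)]
  rfl

lemma pyRangeM_cons (a b : Int) (h : a < b) :
    PySem.List.pyRange a b 65535 = a :: PySem.List.pyRange (a + 65535) b 65535 := by
  rw [PySem.List.pyRange_of_pos a b (by norm_num),
      PySem.List.pyRange_of_pos (a + 65535) b (by norm_num), if_pos h]
  by_cases h2 : a + 65535 < b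
  · rw [if_pos h2]
    have hn : ((b - a + 65535 - 1) / 65535).toNat
        = ((b - (a + 65535) + 65535 - 1) / 65535).toNat + 1 := by omega
    rw [hn, List.range_succ_eq_map, List.map_cons, List.map_map]
    congr 1
    · norm_num
    apply List.map_congr_left
    intro k _
    simp [Function.comp, Nat.succ_eq_add_one]
    ring
  · rw [if_neg h2]
    have hn : ((b - a + 65535 - 1) / 65535).toNat = 1 := by omega
    rw [hn]
    simp

lemma pyRangeM_single (a b : Int) (h1 : a < b) (h2 : b ≤ a + 65535) :
    PySem.List.pyRange a b 65535 = [a] := by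
  rw [pyRangeM_cons a b h1, pyRangeM_nil _ _ h2]

lemma chunks_single (s e : Int) (h1 : 1 ≤ e - s) (h2 : e - s ≤ 65535) :
    pvChunks (s, e) = [(s, e - s)] := by
  unfold pvChunks
  rw [pyRangeM_single s e (by omega) (by omega)]
  simp
  omega

lemma chunks_step (s e : Int) (h : s + 65535 < e) :
    pvChunks (s, e) = (s, 65535) :: pvChunks (s + 65535, e) := by
  unfold pvChunks
  rw [pyRangeM_cons s e (by omega)]
  simp
  omega

-- branch equations for A's loop body
lemma ipsLoopA_nil (pos start l1 : Int) :
    ipsLoopA [] pos start l1 = if start ≠ -1 then [(start, l1 - start)] else [] := rfl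

lemma ipsLoopA_begin (b1 b2 : Int) (rest : List (Int × Int)) (pos l1 : Int) (h : b1 ≠ b2) :
    ipsLoopA ((b1, b2) :: rest) pos (-1) l1 = ipsLoopA rest (pos + 1) pos l1 := by
  simp [ipsLoopA, h]

lemma ipsLoopA_skip (b1 b2 : Int) (rest : List (Int × Int)) (pos l1 : Int) (h : b1 = b2) :
    ipsLoopA ((b1, b2) :: rest) pos (-1) l1 = ipsLoopA rest (pos + 1) (-1) l1 := by
  simp [ipsLoopA, h]

lemma ipsLoopA_close (b1 b2 : Int) (rest : List (Int × Int)) (pos s l1 : Int)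
    (hs : s ≠ -1) (h : b1 = b2) :
    ipsLoopA ((b1, b2) :: rest) pos s l1 = (s, pos - s) :: ipsLoopA rest (pos + 1) (-1) l1 := by
  simp [ipsLoopA, hs, h]

lemma ipsLoopA_restart (b1 b2 : Int) (rest : List (Int × Int)) (pos s l1 : Int)
    (hs : s ≠ -1) (h : b1 ≠ b2) (hm : pos - s = 65535) :
    ipsLoopA ((b1, b2) :: rest) pos s l1 = (s, pos - s) :: ipsLoopA rest (pos + 1) pos l1 := by
  simp [ipsLoopA, hs, h, hm]

lemma ipsLoopA_cont (b1 b2 : Int) (rest : List (Int × Int)) (pos s l1 : Int)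
    (hs : s ≠ -1) (h : b1 ≠ b2) (hm : pos - s ≠ 65535) :
    ipsLoopA ((b1, b2) :: rest) pos s l1 = ipsLoopA rest (pos + 1) s l1 := by
  simp [ipsLoopA, hs, h, hm]

-- shape of pvRuns in the open state: the first run's end and the tail are
-- independent of the recorded start
def runEnd : List Bool → Int → Int → Int
  | [], _, endv => endv
  | d :: rest, i, endv => if d then runEnd rest (i + 1) endv else i

def runTail : List Bool → Int → Int → List (Int × Int)
  | [], _, _ => []
  | d :: rest, i, endv => if d then runTail rest (i + 1) endv else pvRuns rest (i + 1) none endv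

lemma pvRuns_some (l : List Bool) (i s endv : Int) :
    pvRuns l i (some s) endv = (s, runEnd l i endv) :: runTail l i endv := by
  induction l generalizing i with
  | nil => simp [pvRuns, runEnd, runTail]
  | cons d rest ih =>
      by_cases hd : d = true
      · simp [pvRuns, runEnd, runTail, hd, ih]
      · simp at hd; simp [pvRuns, runEnd, runTail, hd]

lemma runEnd_ge (l : List Bool) (i endv : Int) (h : i + (l.length : Int) ≤ endv) :
    i ≤ runEnd l i endv := by
  induction l generalizing i with
  | nil => simpa [runEnd] using h
  | cons d rest ih =>
      by_cases hd : d = true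
      · simp only [runEnd, hd, if_true]
        have := ih (i + 1) (by simp at h ⊢; omega)
        omega
      · simp at hd; simp [runEnd, hd]

-- the main loop invariant: A's loop emits exactly the chunkings of B's runs
lemma loopA_eq_runs (p : List (Int × Int)) : ∀ (pos : Int) (cur : Option Int) (l1 : Int),
    0 ≤ pos →
    (∀ s, cur = some s → 0 ≤ s ∧ 1 ≤ pos - s ∧ pos - s ≤ 65535) →
    pos + (p.length : Int) = l1 →
    ipsLoopA p pos (cur.getD (-1)) l1 =
      (pvRuns (p.map (fun q => decide (q.1 ≠ q.2))) pos cur l1).flatMap pvChunks := by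
  induction p with
  | nil =>
      intro pos cur l1 hpos hcur hl1
      cases cur with
      | none => simp [ipsLoopA_nil, pvRuns]
      | some s =>
          obtain ⟨hs0, h1, h2⟩ := hcur s rfl
          simp only [List.length_nil, Nat.cast_zero, add_zero] at hl1
          subst hl1
          simp only [Option.getD_some, List.map_nil]
          rw [ipsLoopA_nil, if_pos (by omega : s ≠ -1)]
          show _ = List.flatMap pvChunks [(s, pos)]
          simp only [List.flatMap_cons, List.flatMap_nil, List.append_nil]
          rw [chunks_single s pos h1 h2]
  | cons q rest ih =>
      intro pos cur l1 hpos hcur hl1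
      obtain ⟨b1, b2⟩ := q
      have hl1' : (pos + 1) + (rest.length : Int) = l1 := by simp at hl1; omega
      cases cur with
      | none =>
          simp only [Option.getD_none]
          by_cases hd : b1 = b2
          · rw [ipsLoopA_skip b1 b2 rest pos l1 hd]
            have : decide (b1 ≠ b2) = false := by simp [hd]
            simp only [List.map_cons, this, pvRuns]
            exact ih (pos + 1) none l1 (by omega) (by intro s hs; cases hs) hl1'
          · rw [ipsLoopA_begin b1 b2 rest pos l1 hd]
            have : decide (b1 ≠ b2) = true := by simp [hd]
            simp only [List.map_cons, this, pvRuns, if_true]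
            have := ih (pos + 1) (some pos) l1 (by omega)
              (by intro s hs; cases hs; exact ⟨hpos, by omega, by norm_num⟩) hl1'
            simpa using this
      | some s =>
          obtain ⟨hs0, h1, h2⟩ := hcur s rfl
          simp only [Option.getD_some]
          by_cases hd : b1 = b2
          · -- run closes at pos
            rw [ipsLoopA_close b1 b2 rest pos s l1 (by omega) hd]
            have : decide (b1 ≠ b2) = false := by simp [hd]
            simp only [List.map_cons, this, pvRuns, if_neg (by simp : ¬ (false = true))]
            rw [List.flatMap_cons, chunks_single s pos h1 h2]
            have := ih (pos + 1) none l1 (by omega) (by intro t ht; cases ht) hl1'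
            simpa using this
          · have hdt : decide (b1 ≠ b2) = true := by simp [hd]
            by_cases hm : pos - s = 65535
            · -- end a block and start a new one
              rw [ipsLoopA_restart b1 b2 rest pos s l1 (by omega) hd hm]
              simp only [List.map_cons, hdt, pvRuns, if_true]
              rw [pvRuns_some, List.flatMap_cons]
              have hE : pos + 1 ≤ runEnd (rest.map (fun q => decide (q.1 ≠ q.2))) (pos + 1) l1 := by
                apply runEnd_ge
                simp only [List.length_map]
                omega
              rw [chunks_step s (runEnd (rest.map (fun q => decide (q.1 ≠ q.2))) (pos + 1) l1)
                (by omega)]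
              have hsp : s + 65535 = pos := by omega
              rw [hsp, hm]
              rw [List.cons_append, ← List.flatMap_cons, ← pvRuns_some]
              congr 1
              exact ih (pos + 1) (some pos) l1 (by omega)
                (by intro t ht; cases ht; exact ⟨hpos, by omega, by norm_num⟩) hl1'
            · -- run continues
              rw [ipsLoopA_cont b1 b2 rest pos s l1 (by omega) hd hm]
              simp only [List.map_cons, hdt, pvRuns, if_true]
              exact ih (pos + 1) (some s) l1 (by omega)
                (by intro t ht; cases ht; exact ⟨hs0, by omega, by omega⟩) hl1'

-- ===== VERDICT (by name: the statement is the Claim_ definition above) =====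
theorem ips_get_blocks_spec : Claim_equal_ips_get_blocks := by
  intro data1 data2 _hdom hpre
  unfold Spec_ips_get_blocks ips_get_blocks ips_get_blocks_alt
  congr 1
  have hmin : min ((data1.length : Int)) ((data2.length : Int)) = (data1.length : Int) := by
    unfold Pre_ips_get_blocks at hpre
    omega
  rw [hmin]
  have hz : ((data1.zip data2).length : Int) = (data1.length : Int) := by
    rw [List.length_zip]
    unfold Pre_ips_get_blocks at hpre
    omega
  have hmain := loopA_eq_runs (data1.zip data2) 0 none (data1.length : Int)
    le_rfl (by intro s hs; cases hs) (by rw [zero_add, hz])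
  simpa using hmain
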